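-- pv_equiv track=rewrite | github.com/mahbub-hasan-abid/Simulation | pooker_with_mcg.py | mcg
-- ===== SOURCE A (Python) =====
-- def mcg(seed, a, m, n):
--     x = seed
--     nums = []
--     for _ in range(n):
--         x = (a * x) % m
--         num_str = str(x).zfill(5)[:5]  # Get 5 digits, zero-padded
--         nums.append(num_str)
--     return nums
-- ===== SOURCE B (Python) =====
-- def mcg(seed, a, m, n):
--     # Closed form: x_k = seed * a**k (mod m); each term computed independently
--     # via modular exponentiation instead of from the previous state.
--     return [str((seed * pow(a, k, m)) % m).zfill(5)[:5] for k in range(1, n + 1)]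
-- ===== Notes on version B (the rewrite author's own statement) =====
-- stated objective: alternative
-- what changed: Replaces the sequential running-state loop (x updated each iteration) with the closed form x_k = (seed * pow(a, k, m)) % m, computing each of the n terms independently by modular exponentiation in a comprehension.
-- outside the precondition, e.g. on mcg(1, 2, 0, 3): A raises ZeroDivisionError, B raises ValueError
import Mathlib
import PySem

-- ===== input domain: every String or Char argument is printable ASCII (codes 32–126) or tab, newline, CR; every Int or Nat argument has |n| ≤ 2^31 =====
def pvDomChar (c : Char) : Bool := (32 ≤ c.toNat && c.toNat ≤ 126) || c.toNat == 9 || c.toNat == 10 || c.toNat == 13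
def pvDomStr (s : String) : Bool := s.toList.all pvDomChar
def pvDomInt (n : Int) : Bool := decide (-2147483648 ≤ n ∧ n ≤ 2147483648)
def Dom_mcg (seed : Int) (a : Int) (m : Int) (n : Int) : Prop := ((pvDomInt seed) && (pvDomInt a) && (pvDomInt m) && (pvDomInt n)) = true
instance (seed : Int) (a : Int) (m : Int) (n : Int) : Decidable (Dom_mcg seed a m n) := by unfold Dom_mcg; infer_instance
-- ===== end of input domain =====

-- B replaces A's sequential running state by the closed form x_k = seed*a^k mod m via modular exponentiation, computing each term independently.


-- str(x).zfill(5)[:5], shared formatting step of both Pythons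
def pvFmt5 (x : Int) : String :=
  PySem.Str.slice (PySem.Str.zfill (PySem.Int.toStr x) 5) none (some 5)

-- ===== PORT A =====
def mcg (seed : Int) (a : Int) (m : Int) (n : Int) : List String :=
  let r := (PySem.List.pyRange 0 n 1).foldl
    (fun (st : Int × List String) _ =>
      let x := PySem.Int.mod (a * st.1) m
      (x, st.2 ++ [pvFmt5 x]))
    (seed, [])
  r.2

-- ===== PORT B =====
def mcg_alt (seed : Int) (a : Int) (m : Int) (n : Int) : List String :=
  (PySem.List.pyRange 1 (n + 1) 1).map
    (fun k => pvFmt5 (PySem.Int.mod (seed * PySem.Int.mod (a ^ k.toNat) m) m))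

-- ===== PRECONDITION & SPEC =====
-- Pre_ excludes exactly the inputs where Python A raises ZeroDivisionError: m = 0 with at least one iteration.
def Pre_mcg (seed : Int) (a : Int) (m : Int) (n : Int) : Prop := m ≠ 0 ∨ n ≤ 0
instance (seed : Int) (a : Int) (m : Int) (n : Int) : Decidable (Pre_mcg seed a m n) := by unfold Pre_mcg; infer_instance
def pvWitness_mcg : Int × Int × Int × Int := (7, 5, 1000, 3)

def Spec_mcg (seed : Int) (a : Int) (m : Int) (n : Int) (out : List String) : Prop := out = mcg_alt seed a m n
instance (seed : Int) (a : Int) (m : Int) (n : Int) (out : List String) : Decidable (Spec_mcg seed a m n out) := by unfold Spec_mcg; infer_instance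

-- ===== CLAIM (what is proved, stated in full; the proofs are below) =====
def Claim_equal_mcg : Prop := ∀ (seed : Int) (a : Int) (m : Int) (n : Int), Dom_mcg seed a m n → Pre_mcg seed a m n → Spec_mcg seed a m n (mcg seed a m n)

-- ===== LEMMAS AND PROOFS =====

-- taking a factor modulo m first does not change a product modulo m
lemma pv_mod_mul_mod (m a x : Int) :
    PySem.Int.mod (a * PySem.Int.mod x m) m = PySem.Int.mod (a * x) m := by
  show (a * x.fmod m).fmod m = (a * x).fmod m
  have hx : x.fmod m = x - m * x.fdiv m := by
    have := Int.mul_fdiv_add_fmod x m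
    omega
  rw [hx]
  have : a * (x - m * x.fdiv m) = a * x + m * (-(a * x.fdiv m)) := by ring
  rw [this, Int.add_mul_fmod_self_left]

-- loop invariant: after N iterations the accumulator is the closed-form list and the
-- running state is congruent to seed * a^N modulo m
lemma pv_fold_spec (seed a m : Int) : ∀ N : Nat,
    (PySem.List.pyRange 0 (N : Int) 1).foldl
      (fun (st : Int × List String) _ =>
        let x := PySem.Int.mod (a * st.1) m
        (x, st.2 ++ [pvFmt5 x]))
      (seed, []) =
    (if N = 0 then seed else PySem.Int.mod (seed * a ^ N) m,
     (PySem.List.pyRange 1 ((N : Int) + 1) 1).map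
       (fun k => pvFmt5 (PySem.Int.mod (seed * PySem.Int.mod (a ^ k.toNat) m) m))) := by
  intro N
  induction N with
  | zero =>
      simp [PySem.List.pyRange_one_eq_nil]
  | succ N ih =>
      have h1 : ((N : Int) + 1) = ((N + 1 : Nat) : Int) := by push_cast; ring
      have hr : PySem.List.pyRange 0 ((N + 1 : Nat) : Int) 1
          = PySem.List.pyRange 0 (N : Int) 1 ++ [(N : Int)] := by
        rw [← h1, PySem.List.pyRange_one_succ_right (by omega)]
      have hr2 : PySem.List.pyRange 1 (((N + 1 : Nat) : Int) + 1) 1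
          = PySem.List.pyRange 1 ((N : Int) + 1) 1 ++ [(N : Int) + 1] := by
        rw [← h1, PySem.List.pyRange_one_succ_right (by omega)]
      rw [hr, List.foldl_append, ih, hr2, List.map_append]
      have hx : PySem.Int.mod (a * (if N = 0 then seed else PySem.Int.mod (seed * a ^ N) m)) m
          = PySem.Int.mod (seed * a ^ (N + 1)) m := by
        by_cases h : N = 0
        · subst h; simp; ring_nf
        · rw [if_neg h, pv_mod_mul_mod]
          ring_nf
      have htn : ((N : Int) + 1).toNat = N + 1 := by omega
      simp only [List.foldl_cons, List.foldl_nil, List.map_cons, List.map_nil, htn,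
        pv_mod_mul_mod]
      simp only [hx]
      simp

-- ===== VERDICT (by name: the statement is the Claim_ definition above) =====
theorem mcg_spec : Claim_equal_mcg := by
  intro seed a m n _ _
  show mcg seed a m n = mcg_alt seed a m n
  unfold mcg mcg_alt
  by_cases hn : n ≤ 0
  · rw [PySem.List.pyRange_one_eq_nil hn, PySem.List.pyRange_one_eq_nil (by omega)]
    simp
  · have hn' : n = ((n.toNat : Nat) : Int) := by omega
    rw [hn', pv_fold_spec]
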